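-- pv_equiv track=rewrite | github.com/hioih177/Fox | translation.py | Line_ChampN
-- ===== SOURCE A (Python) =====
-- def Line_ChampN(LineX):
--
--     Num = 0;
--
--     Top = ["Garen", "Gangplank", "Gnar", "Nami", "Nasus",
--            "Darius","Ryze", "Rumble",
--            "Renekton", "Rengar", "Riven", "Lissandra",
--            "Maokai", "Malzahar", "Malphite", "Mordekaiser", "Dr. Mundo",
--            "Vayne", "Volibear", "Vladimir", "Viktor", "Poppy",
--            "Sion", "Sylas", "Shen",
--            "Singed", "Akali", "Aatrox",
--            "Yasuo", "Wukong", "Ornn", "Olaf", "Yorick",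
--            "Urgot", "Irelia", "Illaoi",
--            "Jax", "Jayce", "Cho'Gath", "Karma",
--            "Camille", "Karthus", "Cassiopeia", "Kennen",
--            "Kayle", "Quinn", "Kled", "Tahm Kench",
--            "Tryndamere", "Teemo", "Pantheon",
--            "Fiora", "Heimerdinger", "Hecarim"]
--     Jg =  ["Gragas", "Graves", "Nocturne",
--            "Nunu & Willump", "Nidalee", "Rammus", "Lux",
--            "Rek'Sai", "Rengar", "Lee Sin", "Riven",
--            "Master Yi", "Vi", "Poppy",
--            "Sylas", "Shaco", "Sejuani", "Shyvana",
--            "Xin Zhao", "Amumu", "Ivern", "Aatrox",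
--            "Elise", "Wukong", "Olaf",
--            "Udyr", "Warwick", "Evelynn", "Jarvan IV", "Zac",
--            "Jax", "Camille", "Karthus", "Khazix",
--            "Kayn", "Kindred", "Taliyah",
--            "Pantheon", "Fiddlesticks",
--            "Hecarim"]
--     Mid = ["Galio", "Nocturne",
--            "Neeko", "Diana", "Ryze", "Lux", "Rumble",
--            "Renekton", "Lulu", "LeBlanc", "Riven", "Lissandra",
--            "Malzahar",
--            "Veigar", "Vel'Koz", "Vladimir", "Viktor",
--            "Sion", "Sylas", "Swain",
--            "Syndra", "Ahri", "Aurelion Sol", "Azir", "Akali",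
--            "Aatrox",
--            "Annie", "Anivia", "Yasuo", "Ekko", "Orianna",
--            "Irelia",
--            "Zed", "Xerath", "Jayce", "Zoe", "Ziggs", "Zilean", "Jinx", "Karma",
--            "Kassadin", "Karthus", "Cassiopeia", "Katarina",
--            "Corki", "Kled", "Talon", "Taliyah",
--            "Twisted Fate", "Pantheon",
--            "Fiora", "Fizz"]
--     Adc = ["Draven", "Lucian", "Miss Fortune", "Varus",
--            "Vayne", "Vladimir", "Viktor",
--            "Sivir",
--            "Ashe", "Yasuo", "Ezreal", "Xayah", "Jine", "Jinx",
--            "Cassiopeia", "Kai'Sa", "Kalistar", "Caitlyn",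
--            "Kog'Maw", "Tristana", "Twitch"]
--     Sup = ["Gragas", "Nami", "Nautilus",
--            "Neeko", "Rakan", "Lux",
--            "Leona", "Lulu",
--            "Morgana", "Bard",
--            "Veigar", "Vel'Koz", "Brand", "Braum", "Blitzcrank",
--            "Poppy",
--            "Sona", "Soraka", "Shen",
--            "Thresh", "Alistar", "Ornn",
--            "Zyra", "Janna", "Xerath", "Zilean", "Karma",
--            "Taric", "Tahm Kench",
--            "Pyke", "Fiddlesticks"]
--
--     for i in range(0, len(Top)):
--           if Top[i] == LineX:
--                 Num += 10000
--                 break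
--
--     for i in range(0, len(Jg)):
--           if Jg[i] == LineX:
--                 Num += 1000
--                 break
--
--     for i in range(0, len(Mid)):
--           if Mid[i] == LineX:
--                 Num += 100
--                 break
--
--     for i in range(0, len(Adc)):
--           if Adc[i] == LineX:
--                 Num += 10
--                 break
--
--     for i in range(0, len(Sup)):
--           if Sup[i] == LineX:
--                 Num += 1
--                 break
--
--     return Num
-- ===== SOURCE B (Python) =====
-- # Precomputed lookup table: each champion's total lane weight, summed over the
-- # lanes whose list contains it (Top 10000, Jg 1000, Mid 100, Adc 10, Sup 1).
-- SCORE = {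
--     "Aatrox": 11100,
--     "Ahri": 100,
--     "Akali": 10100,
--     "Alistar": 1,
--     "Amumu": 1000,
--     "Anivia": 100,
--     "Annie": 100,
--     "Ashe": 10,
--     "Aurelion Sol": 100,
--     "Azir": 100,
--     "Bard": 1,
--     "Blitzcrank": 1,
--     "Brand": 1,
--     "Braum": 1,
--     "Caitlyn": 10,
--     "Camille": 11000,
--     "Cassiopeia": 10110,
--     "Cho'Gath": 10000,
--     "Corki": 100,
--     "Darius": 10000,
--     "Diana": 100,
--     "Dr. Mundo": 10000,
--     "Draven": 10,
--     "Ekko": 100,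
--     "Elise": 1000,
--     "Evelynn": 1000,
--     "Ezreal": 10,
--     "Fiddlesticks": 1001,
--     "Fiora": 10100,
--     "Fizz": 100,
--     "Galio": 100,
--     "Gangplank": 10000,
--     "Garen": 10000,
--     "Gnar": 10000,
--     "Gragas": 1001,
--     "Graves": 1000,
--     "Hecarim": 11000,
--     "Heimerdinger": 10000,
--     "Illaoi": 10000,
--     "Irelia": 10100,
--     "Ivern": 1000,
--     "Janna": 1,
--     "Jarvan IV": 1000,
--     "Jax": 11000,
--     "Jayce": 10100,
--     "Jine": 10,
--     "Jinx": 110,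
--     "Kai'Sa": 10,
--     "Kalistar": 10,
--     "Karma": 10101,
--     "Karthus": 11100,
--     "Kassadin": 100,
--     "Katarina": 100,
--     "Kayle": 10000,
--     "Kayn": 1000,
--     "Kennen": 10000,
--     "Khazix": 1000,
--     "Kindred": 1000,
--     "Kled": 10100,
--     "Kog'Maw": 10,
--     "LeBlanc": 100,
--     "Lee Sin": 1000,
--     "Leona": 1,
--     "Lissandra": 10100,
--     "Lucian": 10,
--     "Lulu": 101,
--     "Lux": 1101,
--     "Malphite": 10000,
--     "Malzahar": 10100,
--     "Maokai": 10000,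
--     "Master Yi": 1000,
--     "Miss Fortune": 10,
--     "Mordekaiser": 10000,
--     "Morgana": 1,
--     "Nami": 10001,
--     "Nasus": 10000,
--     "Nautilus": 1,
--     "Neeko": 101,
--     "Nidalee": 1000,
--     "Nocturne": 1100,
--     "Nunu & Willump": 1000,
--     "Olaf": 11000,
--     "Orianna": 100,
--     "Ornn": 10001,
--     "Pantheon": 11100,
--     "Poppy": 11001,
--     "Pyke": 1,
--     "Quinn": 10000,
--     "Rakan": 1,
--     "Rammus": 1000,
--     "Rek'Sai": 1000,
--     "Renekton": 10100,
--     "Rengar": 11000,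
--     "Riven": 11100,
--     "Rumble": 10100,
--     "Ryze": 10100,
--     "Sejuani": 1000,
--     "Shaco": 1000,
--     "Shen": 10001,
--     "Shyvana": 1000,
--     "Singed": 10000,
--     "Sion": 10100,
--     "Sivir": 10,
--     "Sona": 1,
--     "Soraka": 1,
--     "Swain": 100,
--     "Sylas": 11100,
--     "Syndra": 100,
--     "Tahm Kench": 10001,
--     "Taliyah": 1100,
--     "Talon": 100,
--     "Taric": 1,
--     "Teemo": 10000,
--     "Thresh": 1,
--     "Tristana": 10,
--     "Tryndamere": 10000,
--     "Twisted Fate": 100,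
--     "Twitch": 10,
--     "Udyr": 1000,
--     "Urgot": 10000,
--     "Varus": 10,
--     "Vayne": 10010,
--     "Veigar": 101,
--     "Vel'Koz": 101,
--     "Vi": 1000,
--     "Viktor": 10110,
--     "Vladimir": 10110,
--     "Volibear": 10000,
--     "Warwick": 1000,
--     "Wukong": 11000,
--     "Xayah": 10,
--     "Xerath": 101,
--     "Xin Zhao": 1000,
--     "Yasuo": 10110,
--     "Yorick": 10000,
--     "Zac": 1000,
--     "Zed": 100,
--     "Ziggs": 100,
--     "Zilean": 101,
--     "Zoe": 100,
--     "Zyra": 1,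
-- }
--
--
-- def Line_ChampN(LineX):
--     return SCORE.get(LineX, 0)
-- ===== Notes on version B (the rewrite author's own statement) =====
-- stated objective: simpler
-- what changed: Replaced the five sequential membership scans (with break) by a single precomputed literal dict mapping each champion to its total lane weight, so the function body is one lookup with default 0.
import Mathlib
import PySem

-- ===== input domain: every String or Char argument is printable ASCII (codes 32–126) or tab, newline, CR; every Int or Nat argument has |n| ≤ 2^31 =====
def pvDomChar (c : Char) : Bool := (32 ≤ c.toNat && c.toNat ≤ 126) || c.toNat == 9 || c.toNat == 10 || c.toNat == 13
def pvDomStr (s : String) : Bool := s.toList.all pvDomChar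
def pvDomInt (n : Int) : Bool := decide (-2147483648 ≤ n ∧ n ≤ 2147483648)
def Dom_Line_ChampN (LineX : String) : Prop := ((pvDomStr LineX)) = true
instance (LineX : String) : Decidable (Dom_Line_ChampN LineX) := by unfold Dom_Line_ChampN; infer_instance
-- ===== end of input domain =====

-- B replaces A's five membership scans by one precomputed literal table mapping each
-- champion to its total lane weight; each call is a single lookup with default 0.

-- ===== PORT A =====

def pvTop : List String :=
  ["Garen", "Gangplank", "Gnar", "Nami", "Nasus",
   "Darius", "Ryze", "Rumble",
   "Renekton", "Rengar", "Riven", "Lissandra",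
   "Maokai", "Malzahar", "Malphite", "Mordekaiser", "Dr. Mundo",
   "Vayne", "Volibear", "Vladimir", "Viktor", "Poppy",
   "Sion", "Sylas", "Shen",
   "Singed", "Akali", "Aatrox",
   "Yasuo", "Wukong", "Ornn", "Olaf", "Yorick",
   "Urgot", "Irelia", "Illaoi",
   "Jax", "Jayce", "Cho'Gath", "Karma",
   "Camille", "Karthus", "Cassiopeia", "Kennen",
   "Kayle", "Quinn", "Kled", "Tahm Kench",
   "Tryndamere", "Teemo", "Pantheon",
   "Fiora", "Heimerdinger", "Hecarim"]

def pvJg : List String :=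
  ["Gragas", "Graves", "Nocturne",
   "Nunu & Willump", "Nidalee", "Rammus", "Lux",
   "Rek'Sai", "Rengar", "Lee Sin", "Riven",
   "Master Yi", "Vi", "Poppy",
   "Sylas", "Shaco", "Sejuani", "Shyvana",
   "Xin Zhao", "Amumu", "Ivern", "Aatrox",
   "Elise", "Wukong", "Olaf",
   "Udyr", "Warwick", "Evelynn", "Jarvan IV", "Zac",
   "Jax", "Camille", "Karthus", "Khazix",
   "Kayn", "Kindred", "Taliyah",
   "Pantheon", "Fiddlesticks",
   "Hecarim"]

def pvMid : List String :=
  ["Galio", "Nocturne",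
   "Neeko", "Diana", "Ryze", "Lux", "Rumble",
   "Renekton", "Lulu", "LeBlanc", "Riven", "Lissandra",
   "Malzahar",
   "Veigar", "Vel'Koz", "Vladimir", "Viktor",
   "Sion", "Sylas", "Swain",
   "Syndra", "Ahri", "Aurelion Sol", "Azir", "Akali",
   "Aatrox",
   "Annie", "Anivia", "Yasuo", "Ekko", "Orianna",
   "Irelia",
   "Zed", "Xerath", "Jayce", "Zoe", "Ziggs", "Zilean", "Jinx", "Karma",
   "Kassadin", "Karthus", "Cassiopeia", "Katarina",
   "Corki", "Kled", "Talon", "Taliyah",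
   "Twisted Fate", "Pantheon",
   "Fiora", "Fizz"]

def pvAdc : List String :=
  ["Draven", "Lucian", "Miss Fortune", "Varus",
   "Vayne", "Vladimir", "Viktor",
   "Sivir",
   "Ashe", "Yasuo", "Ezreal", "Xayah", "Jine", "Jinx",
   "Cassiopeia", "Kai'Sa", "Kalistar", "Caitlyn",
   "Kog'Maw", "Tristana", "Twitch"]

def pvSup : List String :=
  ["Gragas", "Nami", "Nautilus",
   "Neeko", "Rakan", "Lux",
   "Leona", "Lulu",
   "Morgana", "Bard",
   "Veigar", "Vel'Koz", "Brand", "Braum", "Blitzcrank",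
   "Poppy",
   "Sona", "Soraka", "Shen",
   "Thresh", "Alistar", "Ornn",
   "Zyra", "Janna", "Xerath", "Zilean", "Karma",
   "Taric", "Tahm Kench",
   "Pyke", "Fiddlesticks"]

-- A's loop 'for i …: if L[i] == LineX: Num += w; break' — scan the list, add w at the
-- first match and stop.
def pvScan (l : List String) (LineX : String) (w : Int) : Int :=
  match l with
  | [] => 0
  | h :: t => if h == LineX then w else pvScan t LineX w

def Line_ChampN (LineX : String) : Int :=
  let num0 : Int := 0
  let num1 := num0 + pvScan pvTop LineX 10000
  let num2 := num1 + pvScan pvJg LineX 1000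
  let num3 := num2 + pvScan pvMid LineX 100
  let num4 := num3 + pvScan pvAdc LineX 10
  let num5 := num4 + pvScan pvSup LineX 1
  num5

-- ===== PORT B =====

-- Source B's literal SCORE table (alphabetical), one entry per champion with its total weight.
def pvSCORE : List (String × Int) :=
  [
   ("Aatrox", 11100),
   ("Ahri", 100),
   ("Akali", 10100),
   ("Alistar", 1),
   ("Amumu", 1000),
   ("Anivia", 100),
   ("Annie", 100),
   ("Ashe", 10),
   ("Aurelion Sol", 100),
   ("Azir", 100),
   ("Bard", 1),
   ("Blitzcrank", 1),
   ("Brand", 1),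
   ("Braum", 1),
   ("Caitlyn", 10),
   ("Camille", 11000),
   ("Cassiopeia", 10110),
   ("Cho'Gath", 10000),
   ("Corki", 100),
   ("Darius", 10000),
   ("Diana", 100),
   ("Dr. Mundo", 10000),
   ("Draven", 10),
   ("Ekko", 100),
   ("Elise", 1000),
   ("Evelynn", 1000),
   ("Ezreal", 10),
   ("Fiddlesticks", 1001),
   ("Fiora", 10100),
   ("Fizz", 100),
   ("Galio", 100),
   ("Gangplank", 10000),
   ("Garen", 10000),
   ("Gnar", 10000),
   ("Gragas", 1001),
   ("Graves", 1000),
   ("Hecarim", 11000),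
   ("Heimerdinger", 10000),
   ("Illaoi", 10000),
   ("Irelia", 10100),
   ("Ivern", 1000),
   ("Janna", 1),
   ("Jarvan IV", 1000),
   ("Jax", 11000),
   ("Jayce", 10100),
   ("Jine", 10),
   ("Jinx", 110),
   ("Kai'Sa", 10),
   ("Kalistar", 10),
   ("Karma", 10101),
   ("Karthus", 11100),
   ("Kassadin", 100),
   ("Katarina", 100),
   ("Kayle", 10000),
   ("Kayn", 1000),
   ("Kennen", 10000),
   ("Khazix", 1000),
   ("Kindred", 1000),
   ("Kled", 10100),
   ("Kog'Maw", 10),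
   ("LeBlanc", 100),
   ("Lee Sin", 1000),
   ("Leona", 1),
   ("Lissandra", 10100),
   ("Lucian", 10),
   ("Lulu", 101),
   ("Lux", 1101),
   ("Malphite", 10000),
   ("Malzahar", 10100),
   ("Maokai", 10000),
   ("Master Yi", 1000),
   ("Miss Fortune", 10),
   ("Mordekaiser", 10000),
   ("Morgana", 1),
   ("Nami", 10001),
   ("Nasus", 10000),
   ("Nautilus", 1),
   ("Neeko", 101),
   ("Nidalee", 1000),
   ("Nocturne", 1100),
   ("Nunu & Willump", 1000),
   ("Olaf", 11000),
   ("Orianna", 100),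
   ("Ornn", 10001),
   ("Pantheon", 11100),
   ("Poppy", 11001),
   ("Pyke", 1),
   ("Quinn", 10000),
   ("Rakan", 1),
   ("Rammus", 1000),
   ("Rek'Sai", 1000),
   ("Renekton", 10100),
   ("Rengar", 11000),
   ("Riven", 11100),
   ("Rumble", 10100),
   ("Ryze", 10100),
   ("Sejuani", 1000),
   ("Shaco", 1000),
   ("Shen", 10001),
   ("Shyvana", 1000),
   ("Singed", 10000),
   ("Sion", 10100),
   ("Sivir", 10),
   ("Sona", 1),
   ("Soraka", 1),
   ("Swain", 100),
   ("Sylas", 11100),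
   ("Syndra", 100),
   ("Tahm Kench", 10001),
   ("Taliyah", 1100),
   ("Talon", 100),
   ("Taric", 1),
   ("Teemo", 10000),
   ("Thresh", 1),
   ("Tristana", 10),
   ("Tryndamere", 10000),
   ("Twisted Fate", 100),
   ("Twitch", 10),
   ("Udyr", 1000),
   ("Urgot", 10000),
   ("Varus", 10),
   ("Vayne", 10010),
   ("Veigar", 101),
   ("Vel'Koz", 101),
   ("Vi", 1000),
   ("Viktor", 10110),
   ("Vladimir", 10110),
   ("Volibear", 10000),
   ("Warwick", 1000),
   ("Wukong", 11000),
   ("Xayah", 10),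
   ("Xerath", 101),
   ("Xin Zhao", 1000),
   ("Yasuo", 10110),
   ("Yorick", 10000),
   ("Zac", 1000),
   ("Zed", 100),
   ("Ziggs", 100),
   ("Zilean", 101),
   ("Zoe", 100),
   ("Zyra", 1)]

def Line_ChampN_alt (LineX : String) : Int :=
  (PySem.Dict.ofList pvSCORE).getD LineX 0

-- ===== PRECONDITION & SPEC =====
def Spec_Line_ChampN (LineX : String) (out : Int) : Prop := out = Line_ChampN_alt LineX
instance (LineX : String) (out : Int) : Decidable (Spec_Line_ChampN LineX out) := by unfold Spec_Line_ChampN; infer_instance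

-- ===== CLAIM =====
def Claim_equal_Line_ChampN : Prop := ∀ (LineX : String), Dom_Line_ChampN LineX → Spec_Line_ChampN LineX (Line_ChampN LineX)

-- ===== LEMMAS AND PROOFS =====

-- A's scan returns w exactly when the name occurs in the list.
theorem pvScan_eq (l : List String) (x : String) (w : Int) :
    pvScan l x w = if x ∈ l then w else 0 := by
  induction l with
  | nil => simp [pvScan]
  | cons h t ih =>
    by_cases hx : h = x
    · simp [pvScan, hx]
    · simp [pvScan, hx, Ne.symm hx, ih]

-- Looking up in an association table whose entries all agree with f gives f inside the
-- key set and the default 0 outside it.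
theorem pvLookup_eq (L : List (String × Int)) (f : String → Int)
    (h1 : ∀ p ∈ L, f p.1 = p.2) (x : String) :
    (PySem.Dict.mk L).getD x 0 = if x ∈ L.map Prod.fst then f x else 0 := by
  induction L with
  | nil => simp [PySem.Dict.getD_eq_get?_getD, PySem.Dict.get?]
  | cons p r ih =>
    obtain ⟨k, v⟩ := p
    have hk : f k = v := h1 (k, v) (List.mem_cons_self ..)
    have hr : ∀ q ∈ r, f q.1 = q.2 := fun q hq => h1 q (List.mem_cons_of_mem _ hq)
    by_cases hx : k = x
    · subst hx
      simp [PySem.Dict.getD_eq_get?_getD, PySem.Dict.get?_mk_cons, hk]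
    · have hb : (k == x) = false := by simpa using hx
      rw [PySem.Dict.getD_eq_get?_getD, PySem.Dict.get?_mk_cons, hb]
      rw [if_neg (by simp), ← PySem.Dict.getD_eq_get?_getD (PySem.Dict.mk r), ih hr]
      have hx' : ¬ x = k := fun h => hx h.symm
      simp only [List.map_cons]
      by_cases hmem : x ∈ List.map Prod.fst r
      · rw [if_pos hmem, if_pos (List.mem_cons_of_mem _ hmem)]
      · rw [if_neg hmem, if_neg (by simp [List.mem_cons, hx', hmem])]

-- ===== VERDICT =====
set_option maxRecDepth 40000 in
theorem Line_ChampN_spec : Claim_equal_Line_ChampN := by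
  intro x _
  unfold Spec_Line_ChampN Line_ChampN_alt
  have hof : PySem.Dict.ofList pvSCORE = PySem.Dict.mk pvSCORE := by decide
  have h1 : ∀ p ∈ pvSCORE, Line_ChampN p.1 = p.2 := by decide
  rw [hof, pvLookup_eq pvSCORE Line_ChampN h1 x]
  by_cases hm : x ∈ pvSCORE.map Prod.fst
  · simp [hm]
  · -- x is none of the champions, so every lane scan misses.
    have hT : ∀ n ∈ pvTop, n ∈ pvSCORE.map Prod.fst := by decide
    have hJ : ∀ n ∈ pvJg, n ∈ pvSCORE.map Prod.fst := by decide
    have hM : ∀ n ∈ pvMid, n ∈ pvSCORE.map Prod.fst := by decide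
    have hA : ∀ n ∈ pvAdc, n ∈ pvSCORE.map Prod.fst := by decide
    have hS : ∀ n ∈ pvSup, n ∈ pvSCORE.map Prod.fst := by decide
    have nT : x ∉ pvTop := fun h => hm (hT x h)
    have nJ : x ∉ pvJg := fun h => hm (hJ x h)
    have nM : x ∉ pvMid := fun h => hm (hM x h)
    have nA : x ∉ pvAdc := fun h => hm (hA x h)
    have nS : x ∉ pvSup := fun h => hm (hS x h)
    simp [Line_ChampN, pvScan_eq, hm, nT, nJ, nM, nA, nS]
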